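-- pv_equiv track=rewrite | github.com/MuhammadTausif/code-signal | arcade/1. Intro (60)/9. Dark Wilderness/40- longestDigitsPrefix.py | solution
-- ===== SOURCE A (Python) =====
-- def solution(inputString):
--     ans=""
--     data="0123456789"
--     for i in inputString:
--         if i not in data:
--             return ans
--         ans+=i
--     return ans
-- ===== SOURCE B (Python) =====
-- import re
--
-- def solution(inputString):
--     m = re.match(r'[0-9]+', inputString)
--     return m.group() if m else ''
-- ===== Notes on version B (the rewrite author's own statement) =====
-- stated objective: idiomatic
-- what changed: Replaces the manual per-character loop with string concatenation by a single anchored regex match [0-9]+ that captures the leading digit run.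
import Mathlib
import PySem

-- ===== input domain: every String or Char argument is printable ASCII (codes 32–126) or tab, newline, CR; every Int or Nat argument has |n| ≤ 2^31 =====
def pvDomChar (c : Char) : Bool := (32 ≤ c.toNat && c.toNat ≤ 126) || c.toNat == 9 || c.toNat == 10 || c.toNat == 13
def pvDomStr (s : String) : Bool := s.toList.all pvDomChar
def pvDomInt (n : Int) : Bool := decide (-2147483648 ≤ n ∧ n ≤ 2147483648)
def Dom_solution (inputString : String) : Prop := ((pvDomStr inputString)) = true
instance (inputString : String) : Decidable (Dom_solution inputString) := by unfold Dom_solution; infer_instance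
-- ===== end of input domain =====

-- B replaces A's manual accumulate-and-early-return loop by one anchored regex match of [0-9]+ (ported as takeWhile over the digit class).

-- ===== PORT A =====
-- the loop: for i in inputString: if i not in data: return ans; ans += i
def solutionLoop (data : List Char) : List Char → String → String
  | [], ans => ans
  | i :: rest, ans =>
      if ¬ data.contains i then ans
      else solutionLoop data rest (ans ++ String.ofList [i])

def solution (inputString : String) : String :=
  solutionLoop ("0123456789".toList) inputString.toList ""

-- ===== PORT B =====
-- re.match(r'[0-9]+', s): the regex character class [0-9] is exactly the ten chars '0'..'9';
-- an anchored match of [0-9]+ is the maximal leading run of such chars; no match gives "".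
def solution_alt (inputString : String) : String :=
  String.ofList (inputString.toList.takeWhile (fun c => ("0123456789".toList).contains c))

-- ===== PRECONDITION & SPEC =====
def Spec_solution (inputString : String) (out : String) : Prop := out = solution_alt inputString
instance (inputString : String) (out : String) : Decidable (Spec_solution inputString out) := by unfold Spec_solution; infer_instance

-- ===== CLAIM (what is proved, stated in full; the proofs are below) =====
def Claim_equal_solution : Prop := ∀ (inputString : String), Dom_solution inputString → Spec_solution inputString (solution inputString)

-- ===== LEMMAS AND PROOFS =====
theorem solutionLoop_eq (data l : List Char) (ans : String) :
    solutionLoop data l ans = ans ++ String.ofList (l.takeWhile (fun c => data.contains c)) := by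
  induction l generalizing ans with
  | nil => simp [solutionLoop]
  | cons i rest ih =>
      by_cases h : i ∈ data
      · simp [solutionLoop, h, List.takeWhile, ih, String.append_assoc, ← String.ofList_append]
      · simp [solutionLoop, h, List.takeWhile]

-- ===== VERDICT (by name: the statement is the Claim_ definition above) =====
theorem solution_spec : Claim_equal_solution := by
  intro s _
  unfold Spec_solution solution solution_alt
  simp [solutionLoop_eq]
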